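-- pv_equiv track=rewrite | github.com/Ahmad3752/Talash | talash/backend/nodes/parser.py | detect_cv_boundaries
-- ===== SOURCE A (Python) =====
-- def detect_cv_boundaries(pages: list[str]) -> list[str]:
--     """
--     pages  : list of per-page text strings (already split on \f)
--     returns: list of CV text blocks, each being one candidate's full text.
--
--     Logic:
--       - blank page  -> signals end of current CV
--       - content page -> accumulate into current CV
--     """
--     cvs = []
--     current_cv_pages = []
--
--     for page in pages:
--         clean = page.strip()
--
--         if not clean:
--             if current_cv_pages:
--                 cvs.append("\n\n".join(current_cv_pages))
--                 current_cv_pages = []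
--         else:
--             current_cv_pages.append(clean)
--
--     if current_cv_pages:
--         cvs.append("\n\n".join(current_cv_pages))
--
--     return cvs
-- ===== SOURCE B (Python) =====
-- def detect_cv_boundaries(pages: list[str]) -> list[str]:
--     # Run-scanning: pre-strip all pages, then jump over maximal runs of
--     # non-blank pages with an index pair instead of a buffer + flush.
--     stripped = [p.strip() for p in pages]
--     blocks = []
--     i, n = 0, len(stripped)
--     while i < n:
--         if not stripped[i]:
--             i += 1
--             continue
--         j = i + 1
--         while j < n and stripped[j]:
--             j += 1
--         blocks.append("\n\n".join(stripped[i:j]))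
--         i = j
--     return blocks
-- ===== Notes on version B (the rewrite author's own statement) =====
-- stated objective: alternative
-- what changed: Replaces A's running buffer with explicit flush logic by a pre-strip pass followed by two-pointer scanning of maximal non-blank runs, joining each run slice directly.
import Mathlib
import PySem

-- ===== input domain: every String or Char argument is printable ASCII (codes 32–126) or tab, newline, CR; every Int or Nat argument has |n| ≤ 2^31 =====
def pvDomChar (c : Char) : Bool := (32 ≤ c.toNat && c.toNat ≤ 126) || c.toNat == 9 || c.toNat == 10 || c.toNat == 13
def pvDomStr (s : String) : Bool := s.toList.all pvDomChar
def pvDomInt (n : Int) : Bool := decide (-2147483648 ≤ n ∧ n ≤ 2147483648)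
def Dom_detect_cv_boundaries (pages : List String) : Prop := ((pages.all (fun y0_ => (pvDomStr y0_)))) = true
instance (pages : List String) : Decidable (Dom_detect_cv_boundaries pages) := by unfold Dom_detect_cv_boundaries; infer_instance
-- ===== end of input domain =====

-- B replaces A's running buffer + flush with a pre-strip pass and run-scanning (alternative decomposition, same cost).

-- ===== PORT A =====
-- A's loop over pages carrying (cvs, current_cv_pages), with the final flush at [].
def pvALoop (pages : List String) (cvs cur : List String) : List String :=
  match pages with
  | [] => if cur = [] then cvs else cvs ++ [PySem.Str.join "\n\n" cur]
  | p :: rest =>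
    let clean := PySem.Str.strip p
    if clean = "" then
      if cur = [] then pvALoop rest cvs cur
      else pvALoop rest (cvs ++ [PySem.Str.join "\n\n" cur]) []
    else pvALoop rest cvs (cur ++ [clean])

def detect_cv_boundaries (pages : List String) : List String :=
  pvALoop pages [] []

-- ===== PORT B =====
-- B's outer while loop: skip a blank page, or join the maximal non-blank run and jump past it.
def pvBGo : List String → List String
  | [] => []
  | s :: rest =>
    if s = "" then pvBGo rest
    else PySem.Str.join "\n\n" (s :: rest.takeWhile (· ≠ "")) :: pvBGo (rest.dropWhile (· ≠ ""))
termination_by l => l.length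
decreasing_by
  · simp
  · simpa using Nat.lt_succ_of_le (List.length_dropWhile_le _ _)

def detect_cv_boundaries_alt (pages : List String) : List String :=
  pvBGo (pages.map PySem.Str.strip)

-- ===== PRECONDITION & SPEC =====
def Spec_detect_cv_boundaries (pages : List String) (out : List String) : Prop := out = detect_cv_boundaries_alt pages
instance (pages : List String) (out : List String) : Decidable (Spec_detect_cv_boundaries pages out) := by unfold Spec_detect_cv_boundaries; infer_instance

-- ===== CLAIM (what is proved, stated in full; the proofs are below) =====
def Claim_equal_detect_cv_boundaries : Prop := ∀ (pages : List String), Dom_detect_cv_boundaries pages → Spec_detect_cv_boundaries pages (detect_cv_boundaries pages)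

-- ===== LEMMAS AND PROOFS =====

theorem pvBGo_blank (rest : List String) : pvBGo ("" :: rest) = pvBGo rest := by
  simp [pvBGo]

theorem pvBGo_cons (s : String) (rest : List String) (hs : s ≠ "") :
    pvBGo (s :: rest)
      = PySem.Str.join "\n\n" (s :: rest.takeWhile (· ≠ "")) :: pvBGo (rest.dropWhile (· ≠ "")) := by
  rw [pvBGo]
  simp [hs]

/-- Invariant: A's loop equals already-emitted blocks plus B's run-scan of the
stripped remainder, with a pending `cur` merging into the leading run. -/
theorem pvALoop_eq (pages : List String) : ∀ (cvs cur : List String),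
    pvALoop pages cvs cur =
      cvs ++ (if cur = [] then pvBGo (pages.map PySem.Str.strip)
        else PySem.Str.join "\n\n" (cur ++ (pages.map PySem.Str.strip).takeWhile (· ≠ ""))
          :: pvBGo ((pages.map PySem.Str.strip).dropWhile (· ≠ ""))) := by
  induction pages with
  | nil =>
    intro cvs cur
    by_cases h : cur = [] <;> simp [pvALoop, pvBGo, h]
  | cons p rest ih =>
    intro cvs cur
    by_cases hc : PySem.Str.strip p = ""
    · by_cases h : cur = []
      · simp [pvALoop, hc, h, ih, pvBGo_blank]
      · simp [pvALoop, hc, h, ih, pvBGo_blank]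
    · by_cases h : cur = [] <;>
        simp [pvALoop, hc, h, ih, pvBGo_cons _ _ hc, List.takeWhile_cons, List.dropWhile_cons]

-- ===== VERDICT (by name: the statement is the Claim_ definition above) =====
theorem detect_cv_boundaries_spec : Claim_equal_detect_cv_boundaries := by
  intro pages _
  unfold Spec_detect_cv_boundaries detect_cv_boundaries detect_cv_boundaries_alt
  simp [pvALoop_eq]
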